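-- pv_equiv track=rewrite | github.com/vitormbispo/fundamentos-algoritmos | Outros exercícios/cria_lista.py | tem_positivo
-- ===== SOURCE A (Python) =====
-- def tem_positivo(lis:list[int],i:int = 0):
--     if lis != []:
--         if i >= len(lis)-1:
--             pos = lis[i] > 0
--         else:
--             if lis[i] > 0:
--                 pos = True
--             else:
--                 pos = tem_positivo(lis,i+1)
--
--     else:
--         pos = False
--
--     return pos
-- ===== SOURCE B (Python) =====
-- def tem_positivo(lis: list[int], i: int = 0):
--     if not lis:
--         return False
--     return any(x > 0 for x in lis[max(i, 0):])
-- ===== Notes on version B (the rewrite author's own statement) =====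
-- stated objective: simpler
-- what changed: Replaces A's per-index recursion with quirky branch structure by a flat slice-and-any scan: B returns any(x > 0 for x in lis[max(i,0):]) for the non-empty case.
import Mathlib
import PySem

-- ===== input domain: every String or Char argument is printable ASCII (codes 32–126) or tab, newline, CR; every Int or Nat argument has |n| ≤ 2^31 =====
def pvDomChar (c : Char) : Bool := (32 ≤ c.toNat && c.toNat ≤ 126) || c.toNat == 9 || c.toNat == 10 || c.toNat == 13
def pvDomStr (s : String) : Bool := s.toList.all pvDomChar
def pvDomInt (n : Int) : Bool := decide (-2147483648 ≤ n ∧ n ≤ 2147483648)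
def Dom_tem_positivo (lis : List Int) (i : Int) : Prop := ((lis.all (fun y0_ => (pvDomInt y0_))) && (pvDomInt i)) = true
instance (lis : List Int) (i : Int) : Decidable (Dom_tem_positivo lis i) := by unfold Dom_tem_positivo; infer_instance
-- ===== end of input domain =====

-- B replaces A's per-index recursion by a single slice-and-any scan (objective: simpler).

-- ===== PORT A =====
-- literal port of A; PySem.List.pyGet? is lis[i] (none = IndexError, excluded by Pre_)
def tem_positivo (lis : List Int) (i : Int) : Bool :=
  if lis ≠ [] then
    if _h : i ≥ (lis.length : Int) - 1 then
      match PySem.List.pyGet? lis i with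
      | some v => decide (v > 0)
      | none => false          -- IndexError in Python; outside Pre_
    else
      match PySem.List.pyGet? lis i with
      | some v => if v > 0 then true else tem_positivo lis (i + 1)
      | none => false          -- IndexError in Python; outside Pre_
  else false
termination_by ((lis.length : Int) - 1 - i).toNat
decreasing_by omega

-- ===== PORT B =====
def tem_positivo_alt (lis : List Int) (i : Int) : Bool :=
  if lis = [] then false
  else (PySem.List.slice lis (some (max i 0)) none).any (fun x => decide (x > 0))

-- ===== PRECONDITION & SPEC =====
-- Pre_ excludes exactly the inputs where A raises IndexError: non-empty lis with i outside [-len, len-1].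
def Pre_tem_positivo (lis : List Int) (i : Int) : Prop :=
  lis = [] ∨ (-(lis.length : Int) ≤ i ∧ i ≤ (lis.length : Int) - 1)
instance (lis : List Int) (i : Int) : Decidable (Pre_tem_positivo lis i) := by
  unfold Pre_tem_positivo; infer_instance

def pvWitness_tem_positivo : List Int × Int := ([-2, 3, 0], 1)

def Spec_tem_positivo (lis : List Int) (i : Int) (out : Bool) : Prop := out = tem_positivo_alt lis i
instance (lis : List Int) (i : Int) (out : Bool) : Decidable (Spec_tem_positivo lis i out) := by
  unfold Spec_tem_positivo; infer_instance

-- ===== CLAIM (what is proved, stated in full; the proofs are below) =====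
def Claim_equal_tem_positivo : Prop := ∀ (lis : List Int) (i : Int), Dom_tem_positivo lis i → Pre_tem_positivo lis i → Spec_tem_positivo lis i (tem_positivo lis i)

-- ===== LEMMAS AND PROOFS =====

-- any-positive over the whole list absorbs any element of the list
theorem any_absorb_mem (lis : List Int) (v : Int) (hv : v ∈ lis) :
    (if v > 0 then true else lis.any (fun x => decide (x > 0))) = lis.any (fun x => decide (x > 0)) := by
  split_ifs with h
  · exact (List.any_eq_true.mpr ⟨v, hv, by simpa using h⟩).symm
  · rfl

-- characterisation of A's recursion on its admitted domain
theorem tem_positivo_eq_drop (lis : List Int) (i : Int) (hne : lis ≠ [])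
    (hlo : -(lis.length : Int) ≤ i) (hhi : i ≤ (lis.length : Int) - 1) :
    tem_positivo lis i = (lis.drop (max i 0).toNat).any (fun x => decide (x > 0)) := by
  rw [tem_positivo]
  simp only [hne, if_true, ne_eq, not_false_eq_true]
  by_cases hlast : i ≥ (lis.length : Int) - 1
  · -- i = len - 1 : A returns lis[i] > 0, and drop (len-1) = [last element]
    have hi : i = (lis.length : Int) - 1 := le_antisymm hhi hlast
    have hlen : 0 < lis.length := List.length_pos_iff.mpr hne
    subst hi
    have hget : PySem.List.pyGet? lis ((lis.length : Int) - 1) = some (lis[lis.length - 1]) := by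
      have : ((lis.length : Int) - 1) = ((lis.length - 1 : Nat) : Int) := by omega
      rw [this, PySem.List.pyGet?_natCast]
      simp
    rw [dif_pos (le_refl _), hget]
    have hmax : (max ((lis.length : Int) - 1) 0).toNat = lis.length - 1 := by omega
    rw [hmax]
    have hdrop : lis.drop (lis.length - 1) = [lis[lis.length - 1]] := by
      rw [List.drop_eq_getElem_cons (l := lis) (i := lis.length - 1) (by omega),
        show lis.length - 1 + 1 = lis.length from by omega, List.drop_length]
    simp [hdrop]
  · rw [dif_neg hlast]
    replace hlast := lt_of_not_ge hlast
    by_cases hnn : 0 ≤ i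
    · -- 0 ≤ i < len - 1 : head of the drop, then recurse
      have hilt : i < (lis.length : Int) := by omega
      have hget : PySem.List.pyGet? lis i = some (lis[i.toNat]'(by omega)) := by
        simp [PySem.List.pyGet?, PySem.List.pyIdx?, hnn, hilt]
      rw [hget]
      have ih := tem_positivo_eq_drop lis (i + 1) hne (by omega) (by omega)
      rw [ih]
      have h1 : (max (i + 1) 0).toNat = i.toNat + 1 := by omega
      have h2 : (max i 0).toNat = i.toNat := by omega
      rw [h1, h2, List.drop_eq_getElem_cons (show i.toNat < lis.length by omega)]
      simp only [List.any_cons]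
      by_cases hv : lis[i.toNat]'(by omega) > 0 <;> simp [hv]
    · -- negative i : element is a member; whole-list any absorbs it
      replace hnn := lt_of_not_ge hnn
      have hget : PySem.List.pyGet? lis i =
          some (lis[((lis.length : Int) + i).toNat]'(by omega)) := by
        simp [PySem.List.pyGet?, PySem.List.pyIdx?, not_le.mpr hnn, hlo]
        rw [show lis.length - (-i).toNat = ((lis.length : Int) + i).toNat from by omega]
        exact List.getElem?_eq_getElem _
      rw [hget]
      have ih := tem_positivo_eq_drop lis (i + 1) hne (by omega)
        (by have := List.length_pos_iff.mpr hne; omega)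
      rw [ih]
      have h1 : (max (i + 1) 0).toNat = 0 := by omega
      have h2 : (max i 0).toNat = 0 := by omega
      rw [h1, h2]
      simp only [List.drop_zero]
      exact any_absorb_mem lis _ (List.getElem_mem _)
termination_by ((lis.length : Int) - 1 - i).toNat
decreasing_by all_goals omega

-- ===== VERDICT (by name: the statement is the Claim_ definition above) =====
theorem tem_positivo_spec : Claim_equal_tem_positivo := by
  intro lis i _hdom hpre
  unfold Spec_tem_positivo tem_positivo_alt
  rcases hpre with hnil | ⟨hlo, hhi⟩
  · subst hnil; rw [tem_positivo]; simp
  · by_cases hne : lis = []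
    · subst hne; simp at hlo hhi; omega
    · rw [if_neg hne, tem_positivo_eq_drop lis i hne hlo hhi,
        PySem.List.slice_from (xs := lis) (le_max_right i 0)]
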